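-- pv_equiv track=rewrite | github.com/miliar/Code_Jam_Webscraper | Solutions_python/Problem_34/623.py | scan_wordlist
-- ===== SOURCE A (Python) =====
-- def scan_wordlist(inputlist, wordlist):
--     total = 0
--     for i in wordlist:
--         found = 1
--         for j,k in zip(i,inputlist):
--             if not (j in k):
--                 found = 0
--                 break
--         if (found):
--             total = total + 1
--     return total
-- ===== SOURCE B (Python) =====
-- def scan_wordlist(inputlist, wordlist):
--     # Column-wise filter: keep a shrinking candidate list, one position at a time.
--     # Positions at or beyond every word's length cannot filter, so stop there.
--     cand = list(wordlist)
--     limit = min(len(inputlist), max(map(len, wordlist), default=0))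
--     for p in range(limit):
--         cand = [w for w in cand if p >= len(w) or w[p] in inputlist[p]]
--     return len(cand)
-- ===== Notes on version B (the rewrite author's own statement) =====
-- stated objective: alternative
-- what changed: Transposed the loops: instead of testing each word independently against zip(word, inputlist) with a break flag, B filters a shrinking candidate list column by column (positions outer, words inner), stopping at the longest word since later positions cannot filter, and returns the final candidate count.
import Mathlib
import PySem

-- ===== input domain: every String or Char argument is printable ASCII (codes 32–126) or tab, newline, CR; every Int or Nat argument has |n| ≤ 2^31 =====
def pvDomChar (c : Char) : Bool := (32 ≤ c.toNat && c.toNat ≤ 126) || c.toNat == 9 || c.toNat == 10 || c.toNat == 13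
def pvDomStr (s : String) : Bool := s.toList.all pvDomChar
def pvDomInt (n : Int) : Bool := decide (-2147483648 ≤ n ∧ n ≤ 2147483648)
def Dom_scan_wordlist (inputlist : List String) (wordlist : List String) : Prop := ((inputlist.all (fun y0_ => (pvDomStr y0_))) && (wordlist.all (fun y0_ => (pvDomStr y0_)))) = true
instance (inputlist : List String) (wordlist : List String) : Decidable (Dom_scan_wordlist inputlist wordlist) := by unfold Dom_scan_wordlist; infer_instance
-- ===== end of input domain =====

-- B replaces A's word-by-word zip scan (with a break flag) by a column-wise filter of a
-- shrinking candidate list (positions outer, words inner); same results, similar cost.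

-- ===== PORT A =====
-- inner 'for j,k in zip(i, inputlist): if not (j in k): found = 0; break'
def pvScanPairs : List (Char × String) → Int
  | [] => 1
  | (j, k) :: rest => if j ∈ k.toList then pvScanPairs rest else 0

def scan_wordlist (inputlist : List String) (wordlist : List String) : Int :=
  wordlist.foldl (fun total i =>
    let found := pvScanPairs (i.toList.zip inputlist)
    if found ≠ 0 then total + 1 else total) 0

-- ===== PORT B =====
-- 'cand = [w for w in cand if p >= len(w) or w[p] in inputlist[p]]' (index p is in range
-- for inputlist, and guarded for w, so getD is exact here)
def pvKeep (inputlist : List String) (p : Nat) (w : String) : Bool :=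
  decide (w.toList.length ≤ p) || decide (w.toList.getD p ' ' ∈ (inputlist.getD p "").toList)

-- 'limit = min(len(inputlist), max(map(len, wordlist), default=0))'
def scan_wordlist_alt (inputlist : List String) (wordlist : List String) : Int :=
  let limit := min inputlist.length (wordlist.foldl (fun m w => max m w.toList.length) 0)
  let cand := (List.range limit).foldl
    (fun cand p => cand.filter (pvKeep inputlist p)) wordlist
  (cand.length : Int)

-- ===== PRECONDITION & SPEC =====
def Spec_scan_wordlist (inputlist : List String) (wordlist : List String) (out : Int) : Prop := out = scan_wordlist_alt inputlist wordlist
instance (inputlist : List String) (wordlist : List String) (out : Int) : Decidable (Spec_scan_wordlist inputlist wordlist out) := by unfold Spec_scan_wordlist; infer_instance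

-- ===== CLAIM (what is proved, stated in full; the proofs are below) =====
def Claim_equal_scan_wordlist : Prop := ∀ (inputlist : List String) (wordlist : List String), Dom_scan_wordlist inputlist wordlist → Spec_scan_wordlist inputlist wordlist (scan_wordlist inputlist wordlist)

-- ===== LEMMAS AND PROOFS =====

-- the zipped predicate both sides compute
def pvOk (inputlist : List String) (w : String) : Bool :=
  (w.toList.zip inputlist).all (fun jk => decide (jk.1 ∈ jk.2.toList))

lemma pvScanPairs_eq (l : List (Char × String)) :
    pvScanPairs l = if l.all (fun jk => decide (jk.1 ∈ jk.2.toList)) then 1 else 0 := by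
  induction l with
  | nil => rfl
  | cons hd tl ih =>
    obtain ⟨j, k⟩ := hd
    show (if j ∈ k.toList then pvScanPairs tl else 0) = _
    by_cases hc : j ∈ k.toList
    · rw [if_pos hc, List.all_cons, decide_eq_true hc, Bool.true_and, ih]
    · rw [if_neg hc, List.all_cons, decide_eq_false hc, Bool.false_and]
      simp

lemma pvCountFold (p : String → Bool) (l : List String) (t : Int) :
    l.foldl (fun acc x => if p x then acc + 1 else acc) t = t + ((l.filter p).length : Int) := by
  induction l generalizing t with
  | nil => simp
  | cons hd tl ih =>
    by_cases h : p hd = true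
    · simp [List.foldl_cons, h, ih]
      ring
    · simp [List.foldl_cons, h, ih]

lemma pvA_eq (inputlist wordlist : List String) :
    scan_wordlist inputlist wordlist = ((wordlist.filter (pvOk inputlist)).length : Int) := by
  unfold scan_wordlist
  have hfun : (fun (total : Int) (i : String) =>
      let found := pvScanPairs (i.toList.zip inputlist)
      if found ≠ 0 then total + 1 else total)
      = (fun (total : Int) (i : String) => if pvOk inputlist i then total + 1 else total) := by
    funext total i
    simp only [pvScanPairs_eq, pvOk]
    split_ifs with h1 h2 h3 <;> simp_all
  rw [hfun, pvCountFold]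
  simp

lemma pvFilterFold (g : Nat → String → Bool) (n : Nat) (cand : List String) :
    (List.range n).foldl (fun c p => c.filter (g p)) cand
      = cand.filter (fun w => (List.range n).all (fun p => g p w)) := by
  induction n generalizing cand with
  | zero => simp
  | succ m ih =>
    rw [List.range_succ, List.foldl_append, List.foldl_cons, List.foldl_nil, ih,
      List.filter_filter]
    refine List.filter_congr ?_
    intro w _
    simp [List.all_append, Bool.and_comm]

lemma pvKey (ys : List String) (xs : List Char) :
    (List.range ys.length).all
        (fun p => decide (xs.length ≤ p) || decide (xs.getD p ' ' ∈ (ys.getD p "").toList))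
      = (xs.zip ys).all (fun jk => decide (jk.1 ∈ jk.2.toList)) := by
  induction ys generalizing xs with
  | nil => simp
  | cons y ys' ih =>
    rw [List.length_cons, List.range_succ_eq_map, List.all_cons, List.all_map]
    cases xs with
    | nil => simp
    | cons x xs' =>
      simp only [List.getD_cons_zero, List.zip_cons_cons, List.all_cons]
      rw [← ih xs']
      congr 1
      congr 1
      funext p
      simp only [Function.comp_apply, List.getD, List.getElem?_cons_succ, List.length_cons]
      congr 1
      exact decide_eq_decide.mpr (by omega)

-- a ≤ foldl max a
lemma pvFoldlMaxLe (l : List String) : ∀ a : Nat, a ≤ l.foldl (fun m x => max m x.toList.length) a := by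
  induction l with
  | nil => intro a; exact le_refl a
  | cons hd tl ih =>
    intro a
    exact le_trans (le_max_left a hd.toList.length) (ih _)

lemma pvLeFoldlMax (l : List String) :
    ∀ (a : Nat) (w : String), w ∈ l → w.toList.length ≤ l.foldl (fun m x => max m x.toList.length) a := by
  induction l with
  | nil => intro a w hw; cases hw
  | cons hd tl ih =>
    intro a w hw
    rcases List.mem_cons.mp hw with hw | hw
    · subst hw
      exact le_trans (le_max_right a w.toList.length) (pvFoldlMaxLe tl _)
    · exact ih _ w hw

-- positions p with m ≤ p < n all pass the test, so the range can be truncated at m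
lemma pvAllRangeTrunc (g : Nat → Bool) (m n : Nat) (hmn : m ≤ n)
    (h : ∀ p, m ≤ p → p < n → g p = true) :
    (List.range n).all g = (List.range m).all g := by
  induction n with
  | zero =>
    have : m = 0 := Nat.le_zero.mp hmn
    rw [this]
  | succ k ih =>
    rcases Nat.lt_or_ge m (k + 1) with hlt | hge
    · have hmk : m ≤ k := Nat.lt_succ_iff.mp hlt
      rw [List.range_succ, List.all_append]
      have hg : g k = true := h k hmk (Nat.lt_succ_self k)
      rw [ih hmk (fun p hp hpk => h p hp (Nat.lt_succ_of_lt hpk))]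
      simp [hg]
    · have : m = k + 1 := le_antisymm hmn hge
      rw [this]

lemma pvB_eq (inputlist wordlist : List String) :
    scan_wordlist_alt inputlist wordlist = ((wordlist.filter (pvOk inputlist)).length : Int) := by
  simp only [scan_wordlist_alt]
  rw [pvFilterFold]
  have hfeq : wordlist.filter
      (fun w => (List.range (min inputlist.length
        (wordlist.foldl (fun m w => max m w.toList.length) 0))).all fun p => pvKeep inputlist p w)
      = wordlist.filter (pvOk inputlist) := by
    refine List.filter_congr ?_
    intro w hw
    have hM : w.toList.length ≤ wordlist.foldl (fun m x => max m x.toList.length) 0 :=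
      pvLeFoldlMax wordlist 0 w hw
    rw [← pvAllRangeTrunc (fun p => pvKeep inputlist p w)
        (min inputlist.length (wordlist.foldl (fun m w => max m w.toList.length) 0))
        inputlist.length (Nat.min_le_left _ _)
        (fun p hp hpn => by
          simp only [pvKeep, Bool.or_eq_true, decide_eq_true_eq]
          exact Or.inl (by omega))]
    simpa [pvKeep, pvOk] using pvKey inputlist w.toList
  rw [hfeq]

-- ===== VERDICT (by name: the statement is the Claim_ definition above) =====
theorem scan_wordlist_spec : Claim_equal_scan_wordlist := by
  intro inputlist wordlist _
  unfold Spec_scan_wordlist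
  rw [pvA_eq, pvB_eq]
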